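-- pv_equiv track=rewrite | github.com/b2sdev/CodeSignal-Solutions | TheCore/F-Labyrinth-of-Nested-Loops/weakNumbers.py | solution
-- ===== SOURCE A (Python) =====
-- def solution(n):
--     def count_factors(n):
--         factors = 0
--         for i in range(1, n + 1):
--             if n % i == 0:
--                 factors += 1
--         return factors
--
--     all_factors = [count_factors(num) for num in range(1, n + 1)]
--     weaknesses = []
--     for num, num_factors in enumerate(all_factors, 1):
--         weakness = 0
--         for factor in all_factors[:num]:
--             if factor > num_factors:
--                 weakness += 1
--         weaknesses.append(weakness)
--     weakest = max(weaknesses)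
--     return [weakest, weaknesses.count(weakest)]
-- ===== SOURCE B (Python) =====
-- def solution(n):
--     # Divisor-count sieve, then a single pass with a frequency table of
--     # earlier divisor-counts, tracking the running max and its multiplicity.
--     counts = [0] * (n + 1)
--     for d in range(1, n + 1):
--         for m in range(d, n + 1, d):
--             counts[m] += 1
--     freq = {}
--     best = -1
--     best_cnt = 0
--     for c in counts[1:]:
--         w = 0
--         for v, f in freq.items():
--             if v > c:
--                 w += f
--         freq[c] = freq.get(c, 0) + 1
--         if w > best:
--             best, best_cnt = w, 1
--         elif w == best:
--             best_cnt += 1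
--     return [best, best_cnt]
-- ===== Notes on version B (the rewrite author's own statement) =====
-- stated objective: faster
-- what changed: Replaces per-number trial-division divisor counting and the quadratic per-number rescan of all predecessors by a multiples sieve plus a single pass that keeps a frequency table of earlier divisor-counts and tracks the running maximum weakness and its multiplicity inline.
import Mathlib
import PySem

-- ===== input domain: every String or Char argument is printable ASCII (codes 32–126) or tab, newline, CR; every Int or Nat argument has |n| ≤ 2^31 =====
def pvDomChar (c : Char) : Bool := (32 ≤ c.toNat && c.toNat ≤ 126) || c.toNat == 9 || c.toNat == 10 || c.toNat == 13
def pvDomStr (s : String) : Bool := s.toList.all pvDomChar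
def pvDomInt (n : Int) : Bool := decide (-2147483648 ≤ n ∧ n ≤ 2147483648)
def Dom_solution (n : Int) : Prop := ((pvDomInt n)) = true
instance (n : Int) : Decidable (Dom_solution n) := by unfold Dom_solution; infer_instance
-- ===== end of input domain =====

-- B replaces per-number trial division and the quadratic predecessor rescan by a
-- multiples sieve plus one pass with a frequency table of earlier divisor counts,
-- tracking the running maximum weakness and its multiplicity inline (faster).

-- ===== PORT A =====
-- inner helper count_factors of A
def countFactorsA (m : Int) : Int :=
  (PySem.List.pyRange 1 (m + 1) 1).foldl
    (fun f i => if PySem.Int.mod m i == 0 then f + 1 else f) 0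

-- all_factors = [count_factors(num) for num in range(1, n + 1)]
def allFactorsA (n : Int) : List Int :=
  (PySem.List.pyRange 1 (n + 1) 1).map countFactorsA

-- the weaknesses accumulation loop of A
def weaknessesA (n : Int) : List Int :=
  (PySem.List.enumerate (allFactorsA n) 1).foldl
    (fun ws p =>
      ws ++ [(PySem.List.slice (allFactorsA n) none (some p.1)).foldl
        (fun w f => if f > p.2 then w + 1 else w) 0])
    ([] : List Int)

def solution (n : Int) : List Int :=
  match PySem.List.max? (weaknessesA n) (fun w => w) with
  | some weakest => [weakest, PySem.List.count (weaknessesA n) weakest]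
  | none => []   -- Python raises ValueError (max of empty) here; excluded by Pre_solution

-- ===== PORT B =====
-- the divisor-count sieve ([0]*(n+1), then counts[m] += 1 for every multiple m of every d);
-- indices are provably in 0..n, so pySetD/pyGetD are exact here
def sieveB (n : Int) : List Int :=
  (PySem.List.pyRange 1 (n + 1) 1).foldl
    (fun arr d => (PySem.List.pyRange d (n + 1) d).foldl
      (fun a m => PySem.List.pySetD a m (PySem.List.pyGetD a m 0 + 1)) arr)
    (List.replicate (n + 1).toNat (0 : Int))

-- the single pass: state = (freq table, running best, its multiplicity)
def passB (cs : List Int) : PySem.Dict Int Int × Int × Int :=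
  cs.foldl
    (fun (st : PySem.Dict Int Int × Int × Int) c =>
      let w := st.1.items.foldl (fun w p => if p.1 > c then w + p.2 else w) 0
      let freq := st.1.insert c (st.1.getD c 0 + 1)
      if w > st.2.1 then (freq, w, 1)
      else if w == st.2.1 then (freq, st.2.1, st.2.2 + 1)
      else (freq, st.2.1, st.2.2))
    (PySem.Dict.empty, -1, 0)

def solution_alt (n : Int) : List Int :=
  match passB (PySem.List.slice (sieveB n) (some 1) none) with
  | (_, best, best_cnt) => [best, best_cnt]

-- ===== PRECONDITION & SPEC =====
-- Pre_: Python A raises ValueError (max() of an empty sequence) for n < 1.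
def Pre_solution (n : Int) : Prop := 1 ≤ n
instance (n : Int) : Decidable (Pre_solution n) := by unfold Pre_solution; infer_instance
def pvWitness_solution : Int := 3

def Spec_solution (n : Int) (out : List Int) : Prop := out = solution_alt n
instance (n : Int) (out : List Int) : Decidable (Spec_solution n out) := by unfold Spec_solution; infer_instance

-- ===== CLAIM (what is proved, stated in full; the proofs are below) =====
def Claim_equal_solution : Prop := ∀ (n : Int), Dom_solution n → Pre_solution n → Spec_solution n (solution n)

-- ===== LEMMAS AND PROOFS =====

-- proof-side devices: the list of weaknesses, and the running (max, multiplicity) fold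
def wlist (xs : List Int) : List Int :=
  (List.range xs.length).map (fun k => ((xs.take k).countP (fun f => decide (xs.getD k 0 < f)) : Int))

def bestStep (b : Int × Int) (w : Int) : Int × Int :=
  if w > b.1 then (w, 1) else if w == b.1 then (b.1, b.2 + 1) else b

def bestOf (ws : List Int) : Int × Int := ws.foldl bestStep (-1, 0)

-- sieve inner loop: length preserved
lemma sieve_inner_len (ks : List Int) (arr : List Int) :
    (ks.foldl (fun a m => PySem.List.pySetD a m (PySem.List.pyGetD a m 0 + 1)) arr).length
      = arr.length := by
  induction ks generalizing arr with
  | nil => rfl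
  | cons k ks ih => simp [List.foldl_cons, ih]

lemma sieve_outer_len (n : Int) (ds : List Int) (arr : List Int) :
    (ds.foldl (fun a d => (PySem.List.pyRange d (n + 1) d).foldl
        (fun a m => PySem.List.pySetD a m (PySem.List.pyGetD a m 0 + 1)) a) arr).length
      = arr.length := by
  induction ds generalizing arr with
  | nil => rfl
  | cons d ds ih => rw [List.foldl_cons, ih, sieve_inner_len]

-- sieve inner loop: each cell gains the number of occurrences of its index
lemma sieve_inner (ks : List Int) (arr : List Int)
    (hk : ∀ k ∈ ks, 0 ≤ k ∧ k < (arr.length : Int)) (j : Nat) (hj : j < arr.length) :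
    (ks.foldl (fun a m => PySem.List.pySetD a m (PySem.List.pyGetD a m 0 + 1)) arr).getD j 0
      = arr.getD j 0 + ks.count (j : Int) := by
  induction ks generalizing arr with
  | nil => simp
  | cons k ks ih =>
    obtain ⟨hk0, hklt⟩ := hk k (List.mem_cons_self ..)
    rw [List.foldl_cons]
    have hset : PySem.List.pySetD arr k (PySem.List.pyGetD arr k 0 + 1)
        = arr.set k.toNat (arr.getD k.toNat 0 + 1) := by
      rw [PySem.List.pySetD_of_nonneg arr _ hk0,
          PySem.List.pyGetD_eq_getElem arr 0 hk0 hklt,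
          List.getD_eq_getElem arr 0 (by omega)]
    rw [hset, ih _ (fun x hx => by simpa using hk x (List.mem_cons_of_mem _ hx))
          (by simpa using hj)]
    have hjlt' : j < (arr.set k.toNat (arr.getD k.toNat 0 + 1)).length := by simpa using hj
    rw [List.getD_eq_getElem _ 0 hjlt', List.getD_eq_getElem arr 0 hj, List.count_cons]
    simp only [List.getElem_set, beq_iff_eq]
    by_cases hkj : k = (j : Int)
    · have hkt : k.toNat = j := by omega
      rw [if_pos hkt, if_pos hkj, hkt, List.getD_eq_getElem arr 0 hj]
      push_cast
      ring
    · have hkt : k.toNat ≠ j := by omega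
      rw [if_neg hkt, if_neg hkj]
      push_cast
      ring

-- count of j in range(d, n+1, d)
lemma count_pyRange_step (d n : Int) (hd : 1 ≤ d) (j : Int) (hj1 : 1 ≤ j) (hjn : j ≤ n) :
    (PySem.List.pyRange d (n + 1) d).count j = if d ∣ j then 1 else 0 := by
  have hdpos : (0 : Int) < d := by omega
  have hnd : (PySem.List.pyRange d (n + 1) d).Nodup := by
    rw [PySem.List.pyRange_of_pos _ _ hdpos]
    refine List.Nodup.map ?_ (List.nodup_range)
    intro a b hab
    have h2 : d * (a : Int) = d * (b : Int) :=
      add_left_cancel (show d + d * (a : Int) = d + d * (b : Int) from hab)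
    exact_mod_cast mul_left_cancel₀ (by omega : (d : Int) ≠ 0) h2
  have hmem : j ∈ PySem.List.pyRange d (n + 1) d ↔ d ∣ j := by
    rw [PySem.List.mem_pyRange_iff_of_pos hdpos]
    constructor
    · rintro ⟨h1, h2, h3⟩
      have : d ∣ j - d + d := Dvd.dvd.add h3 dvd_rfl
      simpa using this
    · intro hdj
      refine ⟨Int.le_of_dvd (by omega) hdj, by omega, ?_⟩
      exact dvd_sub hdj dvd_rfl
  by_cases h : d ∣ j
  · rw [if_pos h]
    exact List.count_eq_one_of_mem hnd (hmem.mpr h)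
  · rw [if_neg h]
    exact List.count_eq_zero_of_not_mem (fun hc => h (hmem.mp hc))

-- outer sieve loop
lemma sieve_outer (n : Int) (ds : List Int) (arr : List Int)
    (hlen : (arr.length : Int) = n + 1)
    (hd : ∀ d ∈ ds, 1 ≤ d) (j : Nat) (hj1 : 1 ≤ j) (hj : j < arr.length) :
    (ds.foldl (fun a d => (PySem.List.pyRange d (n + 1) d).foldl
        (fun a m => PySem.List.pySetD a m (PySem.List.pyGetD a m 0 + 1)) a) arr).getD j 0
      = arr.getD j 0 + (ds.countP (fun d => decide (d ∣ (j : Int))) : Int) := by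
  induction ds generalizing arr with
  | nil => simp
  | cons d ds ih =>
    have hd1 : (1 : Int) ≤ d := hd d (List.mem_cons_self ..)
    rw [List.foldl_cons]
    rw [ih _ (by rw [sieve_inner_len]; exact hlen) (fun x hx => hd x (List.mem_cons_of_mem _ hx))
        (by rw [sieve_inner_len]; exact hj)]
    rw [sieve_inner _ _ ?_ j hj]
    · rw [count_pyRange_step d n hd1 j (by exact_mod_cast hj1) (by omega),
          List.countP_cons]
      by_cases hdj : d ∣ (j : Int) <;> simp [hdj] <;> push_cast <;> ring
    · intro k hk
      rw [PySem.List.mem_pyRange_iff_of_pos (by omega)] at hk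
      exact ⟨by omega, by omega⟩

-- A's count_factors counts divisors
lemma countFactorsA_eq (m : Int) :
    countFactorsA m = ((PySem.List.pyRange 1 (m + 1) 1).countP (fun i => decide (i ∣ m)) : Int) := by
  unfold countFactorsA
  rw [PySem.List.foldl_count_if]
  rw [List.countP_congr (fun i _ => ?_)]
  · ring
  · simp [PySem.Int.mod_eq_zero_iff_dvd]

-- divisors of m in [1, n] are exactly its divisors in [1, m]
lemma countP_dvd_range (m n : Int) (hm : 1 ≤ m) (hmn : m ≤ n) :
    (PySem.List.pyRange 1 (n + 1) 1).countP (fun d => decide (d ∣ m))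
      = (PySem.List.pyRange 1 (m + 1) 1).countP (fun i => decide (i ∣ m)) := by
  rw [PySem.List.pyRange_one_append 1 (m + 1) (n + 1) (by omega) (by omega),
      List.countP_append]
  have : (PySem.List.pyRange (m + 1) (n + 1) 1).countP (fun d => decide (d ∣ m)) = 0 := by
    rw [List.countP_eq_zero]
    intro x hx
    rw [PySem.List.mem_pyRange_one] at hx
    simp only [decide_eq_true_eq]
    intro hdvd
    have := Int.le_of_dvd (by omega) hdvd
    omega
  omega

-- the sieved tail equals A's list of divisor counts
lemma factors_eq (n : Int) (hn : 1 ≤ n) :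
    PySem.List.slice (sieveB n) (some 1) none = allFactorsA n := by
  have hlen : (sieveB n).length = (n + 1).toNat := by
    rw [sieveB, sieve_outer_len]; simp
  rw [PySem.List.slice_from _ (by norm_num)]
  have h1 : ((1 : Int)).toNat = 1 := rfl
  rw [h1]
  apply List.ext_getElem
  · simp [hlen, allFactorsA, PySem.List.length_pyRange_one]
    omega
  · intro k hk1 hk2
    have hkn : k < n.toNat := by
      simp [hlen] at hk1
      omega
    have hk : k + 1 < (sieveB n).length := by
      rw [hlen]
      omega
    have hCval : (sieveB n).getD (k + 1) 0
        = ((PySem.List.pyRange 1 (n + 1) 1).countP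
            (fun d => decide (d ∣ ((k + 1 : Nat) : Int))) : Int) := by
      rw [sieveB]
      rw [sieve_outer n _ _ (by simp; omega)
          (fun d hd => by rw [PySem.List.mem_pyRange_one] at hd; omega)
          (k + 1) (by omega) (by simp; omega)]
      simp
    rw [List.getElem_drop]
    simp only [allFactorsA]
    rw [List.getElem_map, PySem.List.getElem_pyRange_one]
    have hgd : (sieveB n)[1 + k] = (sieveB n).getD (k + 1) 0 := by
      rw [List.getD_eq_getElem _ 0 hk]
      congr 1
      omega
    rw [hgd, hCval, countFactorsA_eq]
    have hcast : (1 : Int) + (k : Int) = ((k + 1 : Nat) : Int) := by push_cast; ring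
    rw [hcast]
    rw [countP_dvd_range _ n (by omega) (by omega)]

-- Σ over a nodup list of (if k = x then f k else 0) is f x
lemma sum_ite_eq_list (s : List Int) (hs : s.Nodup) (x : Int) (hx : x ∈ s) (f : Int → Int) :
    (s.map (fun k => if k = x then f k else 0)).sum = f x := by
  induction s with
  | nil => simp at hx
  | cons a t ih =>
    rw [List.nodup_cons] at hs
    rcases List.mem_cons.mp hx with rfl | hxt
    · simp only [List.map_cons, List.sum_cons]
      have hz : (t.map (fun k => if k = x then f k else 0)).sum = 0 := by
        apply List.sum_eq_zero
        intro y hy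
        obtain ⟨k, hk, rfl⟩ := List.mem_map.mp hy
        rw [if_neg (fun hc : k = x => hs.1 (hc ▸ hk))]
      simp [hz]
    · have hne : a ≠ x := fun hc => hs.1 (hc ▸ hxt)
      simp only [List.map_cons, List.sum_cons, if_neg hne, zero_add]
      exact ih hs.2 hxt

-- Σ over a covering nodup list of guarded multiplicities is the countP
lemma sum_count_filter (s : List Int) (hs : s.Nodup) (xs : List Int)
    (hsub : ∀ y ∈ xs, y ∈ s) (c : Int) :
    (s.map (fun k => if c < k then (xs.count k : Int) else 0)).sum
      = (xs.countP (fun y => decide (c < y)) : Int) := by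
  induction xs with
  | nil => simp
  | cons x xs ih =>
    have hx : x ∈ s := hsub x (List.mem_cons_self ..)
    have hsub' : ∀ y ∈ xs, y ∈ s := fun y hy => hsub y (List.mem_cons_of_mem _ hy)
    have hsplit : (fun k => if c < k then ((x :: xs).count k : Int) else 0)
        = fun k => (if c < k then (xs.count k : Int) else 0)
            + (if k = x then (if c < k then 1 else 0) else 0) := by
      funext k
      by_cases h2 : k = x
      · subst h2
        by_cases h1 : c < k
        · simp only [List.count_cons, if_pos h1]
          rw [if_pos (show (k == k) = true by simp)]
          push_cast
          ring
        · simp [h1]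
      · have hx2 : x ≠ k := fun hc => h2 hc.symm
        by_cases h1 : c < k <;> simp [List.count_cons, h1, h2, hx2]
    rw [hsplit, PySem.List.sum_map_add_int, ih hsub',
        sum_ite_eq_list s hs x hx, List.countP_cons]
    by_cases h : c < x <;> simp [h] <;> push_cast <;> ring

-- the frequency-table scan counts the strictly greater earlier elements
lemma counter_scan (xs : List Int) (c : Int) :
    (PySem.Dict.counter xs).items.foldl (fun w p => if p.1 > c then w + p.2 else w) 0
      = (xs.countP (fun y => decide (c < y)) : Int) := by
  rw [PySem.Dict.items_counter, List.foldl_map]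
  have hfun : ∀ (w : Int), ∀ k ∈ PySem.Set.ofList xs,
      (if (k, (xs.count k : Int)).1 > c then w + (k, (xs.count k : Int)).2 else w)
        = w + (if c < k then (xs.count k : Int) else 0) := by
    intro w k _
    by_cases h : c < k <;> simp [h, gt_iff_lt]
  rw [PySem.List.foldl_congr_mem _ _ _ _ hfun, PySem.List.foldl_add, zero_add]
  exact sum_count_filter _ (PySem.Set.nodup_ofList xs) xs
    (fun y hy => (PySem.Set.mem_ofList xs y).mpr hy) c

-- wlist over a snoc
lemma wlist_append (xs : List Int) (c : Int) :
    wlist (xs ++ [c]) = wlist xs ++ [(xs.countP (fun f => decide (c < f)) : Int)] := by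
  unfold wlist
  rw [List.length_append, List.length_singleton, List.range_succ, List.map_append]
  congr 1
  · apply List.map_congr_left
    intro k hk
    rw [List.mem_range] at hk
    rw [List.getD_append _ _ _ _ hk, List.take_append_of_le_length (by omega)]
  · simp [List.take_append_of_le_length (le_refl xs.length), List.take_length]

-- B's single pass maintains (counter of prefix, running max of wlist with its count)
lemma pass_invariant (xs : List Int) :
    passB xs = (PySem.Dict.counter xs, bestOf (wlist xs)) := by
  unfold passB
  induction xs using List.reverseRecOn with
  | nil => simp [wlist, bestOf]; rfl
  | append_singleton xs c ih =>
    rw [List.foldl_append, ih, List.foldl_cons, List.foldl_nil]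
    have hfreq : (PySem.Dict.counter xs).insert c ((PySem.Dict.counter xs).getD c 0 + 1)
        = PySem.Dict.counter (xs ++ [c]) := by
      rw [← PySem.Dict.foldl_insert_getD_add_one_eq_counter,
          ← PySem.Dict.foldl_insert_getD_add_one_eq_counter,
          List.foldl_append, List.foldl_cons, List.foldl_nil]
    have hbest : bestOf (wlist (xs ++ [c]))
        = bestStep (bestOf (wlist xs)) ((xs.countP (fun f => decide (c < f)) : Int)) := by
      rw [wlist_append]
      unfold bestOf
      rw [List.foldl_append, List.foldl_cons, List.foldl_nil]
    simp only [counter_scan, hfreq, hbest, bestStep]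
    split_ifs <;> simp_all

-- bestOf of a nonempty list of nonnegative values is (max, multiplicity of max)
lemma bestOf_spec (ws : List Int) (hne : ws ≠ []) (hnn : ∀ w ∈ ws, 0 ≤ w) :
    (bestOf ws).1 ∈ ws ∧ (∀ y ∈ ws, y ≤ (bestOf ws).1)
      ∧ (bestOf ws).2 = (ws.count (bestOf ws).1 : Int) := by
  induction ws using List.reverseRecOn with
  | nil => exact absurd rfl hne
  | append_singleton xs w ih =>
    have hBW : bestOf (xs ++ [w]) = bestStep (bestOf xs) w := by
      unfold bestOf; rw [List.foldl_append, List.foldl_cons, List.foldl_nil]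
    rcases eq_or_ne xs [] with rfl | hxs
    · have hw : 0 ≤ w := hnn w (by simp)
      have hone : bestOf ([] ++ [w]) = (w, 1) := by
        rw [hBW]
        unfold bestOf bestStep
        simp only [List.foldl_nil]
        rw [if_pos (by omega)]
      rw [hone]
      refine ⟨by simp, by simp, by simp⟩
    · obtain ⟨hmem, hmax, hcnt⟩ := ih hxs (fun y hy => hnn y (List.mem_append_left _ hy))
      rw [hBW]
      unfold bestStep
      split_ifs with h1 h2
      · -- w > current best: new max, count 1
        refine ⟨by simp, ?_, ?_⟩
        · intro y hy
          rcases List.mem_append.mp hy with hy | hy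
          · have := hmax y hy; simp; omega
          · simp at hy; simp [hy]
        · have hnotmem : w ∉ xs := fun hc => by have := hmax w hc; omega
          simp [List.count_append, List.count_eq_zero_of_not_mem hnotmem]
      · -- w equals current best
        have hw : w = (bestOf xs).1 := by simpa using h2
        refine ⟨List.mem_append_left _ hmem, ?_, ?_⟩
        · intro y hy
          rcases List.mem_append.mp hy with hy | hy
          · exact hmax y hy
          · simp at hy; omega
        · rw [List.count_append, hw, hcnt]
          have hone : [(bestOf xs).1].count (bestOf xs).1 = 1 := by simp
          rw [hone]
          push_cast
          ring
      · -- w below current best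
        have hwne : w ≠ (bestOf xs).1 := by
          simp at h2; omega
        refine ⟨List.mem_append_left _ hmem, ?_, ?_⟩
        · intro y hy
          rcases List.mem_append.mp hy with hy | hy
          · exact hmax y hy
          · simp at hy; omega
        · rw [List.count_append, hcnt]
          have hz : [w].count (bestOf xs).1 = 0 :=
            List.count_eq_zero_of_not_mem (by simpa using Ne.symm hwne)
          rw [hz]
          simp

-- A's weaknesses list is wlist of its divisor-count list
lemma weaknesses_eq (n : Int) :
    weaknessesA n = wlist (allFactorsA n) := by
  unfold weaknessesA
  set all := allFactorsA n with hall
  rw [PySem.List.foldl_append_singleton_eq_map, List.nil_append]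
  apply List.ext_getElem
  · simp [wlist, PySem.List.length_enumerate]
  · intro k hk1 hk2
    have hk : k < all.length := by simpa [PySem.List.length_enumerate] using hk1
    rw [List.getElem_map, PySem.List.getElem_enumerate]
    have hslice : PySem.List.slice all none (some (1 + (k : Int)))
        = all.take (k + 1) := by
      rw [PySem.List.slice_to _ (by omega)]
      congr 1
      omega
    rw [hslice]
    have hbody : (fun (w f : Int) => if f > (1 + (k : Int), all[k]).2 then w + 1 else w)
        = fun w f => if (decide (all[k] < f)) = true then w + 1 else w := by
      funext w f
      simp [gt_iff_lt]
    rw [hbody, PySem.List.foldl_count_if, zero_add]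
    unfold wlist
    rw [List.getElem_map, List.getElem_range]
    rw [List.take_succ, List.countP_append, List.getD_eq_getElem _ 0 hk]
    have hz : (all[k]?.toList).countP (fun f => decide (all[k] < f)) = 0 := by
      rw [List.getElem?_eq_getElem hk]
      simp
    rw [hz]
    simp

-- ===== VERDICT (by name: the statement is the Claim_ definition above) =====
theorem solution_spec : Claim_equal_solution := by
  intro n _ hpre
  have hn1 : 1 ≤ n := hpre
  unfold Spec_solution solution solution_alt
  rw [factors_eq n hpre, pass_invariant, weaknesses_eq]
  set all := allFactorsA n with hall
  have hlen : (wlist all).length = n.toNat := by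
    simp [wlist, hall, allFactorsA, PySem.List.length_pyRange_one]
  have hne : wlist all ≠ [] := by
    intro hc
    rw [hc] at hlen
    simp only [List.length_nil] at hlen
    omega
  have hnn : ∀ w ∈ wlist all, 0 ≤ w := by
    intro w hw
    obtain ⟨k, _, rfl⟩ := List.mem_map.mp hw
    positivity
  obtain ⟨hmem, hmax, hcnt⟩ := bestOf_spec (wlist all) hne hnn
  cases hm : PySem.List.max? (wlist all) (fun w => w) with
  | none => exact absurd ((PySem.List.max?_eq_none_iff _ _).mp hm) hne
  | some m =>
    have hmmem : m ∈ wlist all := PySem.List.max?_mem hm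
    have hmmax : ∀ y ∈ wlist all, y ≤ m := PySem.List.max?_isMax hm
    have heq : m = (bestOf (wlist all)).1 :=
      le_antisymm (hmax m hmmem) (hmmax _ hmem)
    show [m, (PySem.List.count (wlist all) m : Int)]
        = [(bestOf (wlist all)).1, (bestOf (wlist all)).2]
    rw [PySem.List.count_eq, heq, ← hcnt]
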